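-- pv_equiv track=rewrite | github.com/fishtrap2/cka-coach-phase3 | src/dashboard_presenters.py | _local_interface_groups
-- ===== SOURCE A (Python) =====
-- from typing import Any, Dict, List
--
-- def _local_interface_groups(network_text: str) -> Dict[str, List[str]]:
--     groups = {
--         "cali": [],
--         "cilium": [],
--         "vxlan": [],
--         "tunl": [],
--     }
--     for line in network_text.splitlines():
--         stripped = line.strip()
--         if not stripped or ": " not in stripped:
--             continue
--         iface_name = stripped.split(": ", 1)[1].split(":", 1)[0].split("@", 1)[0]
--         lower = iface_name.lower()
--         if lower.startswith("cali"):
--             groups["cali"].append(iface_name)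
--         elif lower.startswith(("cilium_host", "cilium_net", "cilium_vxlan")):
--             groups["cilium"].append(iface_name)
--         elif lower == "vxlan.calico":
--             groups["vxlan"].append(iface_name)
--         elif lower == "tunl0":
--             groups["tunl"].append(iface_name)
--     return {key: sorted(set(value)) for key, value in groups.items()}
-- ===== SOURCE B (Python) =====
-- def _local_interface_groups(network_text: str):
--     # Single parse pass, then one independent pass per category.
--     names = []
--     for line in network_text.splitlines():
--         stripped = line.strip()
--         if stripped and ": " in stripped:
--             names.append(stripped.split(": ", 1)[1].split(":", 1)[0].split("@", 1)[0])
--     return {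
--         "cali": sorted({n for n in names if n.lower().startswith("cali")}),
--         "cilium": sorted({n for n in names if n.lower().startswith(("cilium_host", "cilium_net", "cilium_vxlan"))}),
--         "vxlan": sorted({n for n in names if n.lower() == "vxlan.calico"}),
--         "tunl": sorted({n for n in names if n.lower() == "tunl0"}),
--     }
-- ===== Notes on version B (the rewrite author's own statement) =====
-- stated objective: alternative
-- what changed: B parses all interface names in one flat pass and then builds each category with an independent filtered set comprehension, instead of A's single loop dispatching into four mutable dict buckets via an if/elif chain.
import Mathlib
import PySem

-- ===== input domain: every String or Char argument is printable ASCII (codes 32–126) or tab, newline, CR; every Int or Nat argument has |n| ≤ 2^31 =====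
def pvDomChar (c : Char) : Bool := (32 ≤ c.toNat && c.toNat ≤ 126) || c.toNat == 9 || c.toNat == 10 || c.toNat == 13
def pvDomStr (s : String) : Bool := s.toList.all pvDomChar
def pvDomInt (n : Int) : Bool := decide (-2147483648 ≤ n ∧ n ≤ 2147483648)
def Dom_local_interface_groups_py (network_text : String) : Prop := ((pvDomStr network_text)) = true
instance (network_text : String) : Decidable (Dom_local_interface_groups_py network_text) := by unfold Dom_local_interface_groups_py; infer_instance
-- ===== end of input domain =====

-- B parses all names in one flat pass, then builds each category by an independent filtered
-- set comprehension, instead of A's single loop dispatching into four mutable buckets (alternative).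

-- ===== PORT A =====
-- A's loop: one fold over the lines carrying the four bucket lists of the dict.
def local_interface_groups_py (network_text : String) : List (String × List String) :=
  let g := (PySem.Str.splitlines network_text).foldl
    (fun (g : List String × List String × List String × List String) line =>
      let stripped := PySem.Str.strip line
      if stripped == "" || !(PySem.Str.isIn ": " stripped) then g
      else
        -- guard ensures ": " occurs, so index 1 exists; pyGetD default is never used
        let s1 := PySem.List.pyGetD ((PySem.Str.splitMax? stripped ": " 1).getD []) 1 ""
        let s2 := PySem.List.pyGetD ((PySem.Str.splitMax? s1 ":" 1).getD []) 0 ""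
        let iface := PySem.List.pyGetD ((PySem.Str.splitMax? s2 "@" 1).getD []) 0 ""
        let lower := PySem.Str.lower iface
        if PySem.Str.startswith lower "cali" then
          (g.1 ++ [iface], g.2.1, g.2.2.1, g.2.2.2)
        else if PySem.Str.startswith lower "cilium_host" || PySem.Str.startswith lower "cilium_net"
              || PySem.Str.startswith lower "cilium_vxlan" then
          (g.1, g.2.1 ++ [iface], g.2.2.1, g.2.2.2)
        else if lower == "vxlan.calico" then
          (g.1, g.2.1, g.2.2.1 ++ [iface], g.2.2.2)
        else if lower == "tunl0" then
          (g.1, g.2.1, g.2.2.1, g.2.2.2 ++ [iface])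
        else g)
    ([], [], [], [])
  [("cali", PySem.List.sorted (PySem.Set.ofList g.1) (fun x => x) false),
   ("cilium", PySem.List.sorted (PySem.Set.ofList g.2.1) (fun x => x) false),
   ("vxlan", PySem.List.sorted (PySem.Set.ofList g.2.2.1) (fun x => x) false),
   ("tunl", PySem.List.sorted (PySem.Set.ofList g.2.2.2) (fun x => x) false)]

-- ===== PORT B =====
-- stripped.split(": ", 1)[1].split(":", 1)[0].split("@", 1)[0]  (guard ensures [1] exists)
def pvParseLine (stripped : String) : String :=
  let s1 := PySem.List.pyGetD ((PySem.Str.splitMax? stripped ": " 1).getD []) 1 ""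
  let s2 := PySem.List.pyGetD ((PySem.Str.splitMax? s1 ":" 1).getD []) 0 ""
  PySem.List.pyGetD ((PySem.Str.splitMax? s2 "@" 1).getD []) 0 ""

-- the single parse pass: names
def pvLocalNames (network_text : String) : List String :=
  (PySem.Str.splitlines network_text).foldl
    (fun acc line =>
      if !(PySem.Str.strip line == "") && PySem.Str.isIn ": " (PySem.Str.strip line) then
        acc ++ [pvParseLine (PySem.Str.strip line)]
      else acc)
    []

def pvSortedSet (xs : List String) : List String :=
  PySem.List.sorted (PySem.Set.ofList xs) (fun x => x) false

def local_interface_groups_py_alt (network_text : String) : List (String × List String) :=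
  let names := pvLocalNames network_text
  [("cali", pvSortedSet (names.filter (fun n => PySem.Str.startswith (PySem.Str.lower n) "cali"))),
   ("cilium", pvSortedSet (names.filter (fun n =>
      PySem.Str.startswith (PySem.Str.lower n) "cilium_host"
      || PySem.Str.startswith (PySem.Str.lower n) "cilium_net"
      || PySem.Str.startswith (PySem.Str.lower n) "cilium_vxlan"))),
   ("vxlan", pvSortedSet (names.filter (fun n => PySem.Str.lower n == "vxlan.calico"))),
   ("tunl", pvSortedSet (names.filter (fun n => PySem.Str.lower n == "tunl0")))]

-- ===== PRECONDITION & SPEC =====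
def Spec_local_interface_groups_py (network_text : String) (out : List (String × List String)) : Prop := out = local_interface_groups_py_alt network_text
instance (network_text : String) (out : List (String × List String)) : Decidable (Spec_local_interface_groups_py network_text out) := by unfold Spec_local_interface_groups_py; infer_instance

-- ===== CLAIM (what is proved, stated in full; the proofs are below) =====
def Claim_equal_local_interface_groups_py : Prop := ∀ (network_text : String), Dom_local_interface_groups_py network_text → Spec_local_interface_groups_py network_text (local_interface_groups_py network_text)

-- ===== LEMMAS AND PROOFS =====

-- the four category predicates (on a name)
def pvP1 (n : String) : Bool := PySem.Str.startswith (PySem.Str.lower n) "cali"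
def pvP2 (n : String) : Bool :=
  PySem.Str.startswith (PySem.Str.lower n) "cilium_host"
  || PySem.Str.startswith (PySem.Str.lower n) "cilium_net"
  || PySem.Str.startswith (PySem.Str.lower n) "cilium_vxlan"
def pvP3 (n : String) : Bool := PySem.Str.lower n == "vxlan.calico"
def pvP4 (n : String) : Bool := PySem.Str.lower n == "tunl0"

-- two startswith tests with mutually non-prefix patterns cannot both succeed
lemma pv_sw_disjoint (s p q : String)
    (hpq : ¬ (p.toList <+: q.toList) ∧ ¬ (q.toList <+: p.toList))
    (h : PySem.Str.startswith s q = true) : PySem.Str.startswith s p = false := by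
  simp only [PySem.Str.startswith_eq] at h ⊢
  rw [PySem.Chars.startswith_iff] at h
  rw [Bool.eq_false_iff]
  intro hc
  rw [PySem.Chars.startswith_iff] at hc
  rcases List.prefix_or_prefix_of_prefix hc h with h' | h'
  · exact hpq.1 h'
  · exact hpq.2 h'

lemma pv_p1_excl {n : String} (h : pvP1 n = true) : pvP2 n = false ∧ pvP3 n = false ∧ pvP4 n = false := by
  unfold pvP1 at h
  refine ⟨?_, ?_, ?_⟩
  · unfold pvP2
    rw [pv_sw_disjoint _ _ _ (by decide) h, pv_sw_disjoint _ _ _ (by decide) h,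
        pv_sw_disjoint _ _ _ (by decide) h]
    rfl
  · unfold pvP3
    rw [Bool.eq_false_iff]; intro hc
    rw [beq_iff_eq] at hc; rw [hc] at h
    exact absurd h (by decide)
  · unfold pvP4
    rw [Bool.eq_false_iff]; intro hc
    rw [beq_iff_eq] at hc; rw [hc] at h
    exact absurd h (by decide)

lemma pv_p2_excl {n : String} (h : pvP2 n = true) : pvP3 n = false ∧ pvP4 n = false := by
  unfold pvP2 at h
  refine ⟨?_, ?_⟩
  · unfold pvP3
    rw [Bool.eq_false_iff]; intro hc
    rw [beq_iff_eq] at hc; rw [hc] at h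
    exact absurd h (by decide)
  · unfold pvP4
    rw [Bool.eq_false_iff]; intro hc
    rw [beq_iff_eq] at hc; rw [hc] at h
    exact absurd h (by decide)

lemma pv_p3_excl {n : String} (h : pvP3 n = true) : pvP4 n = false := by
  unfold pvP3 at h; unfold pvP4
  rw [beq_iff_eq] at h; rw [h]; decide

-- the invariant of A's fold: its four buckets are the four filters of the parsed names
lemma pv_fold_inv (lines : List String) (c ci v t : List String) :
    lines.foldl
      (fun (g : List String × List String × List String × List String) line =>
        let stripped := PySem.Str.strip line
        if stripped == "" || !(PySem.Str.isIn ": " stripped) then g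
        else
          let s1 := PySem.List.pyGetD ((PySem.Str.splitMax? stripped ": " 1).getD []) 1 ""
          let s2 := PySem.List.pyGetD ((PySem.Str.splitMax? s1 ":" 1).getD []) 0 ""
          let iface := PySem.List.pyGetD ((PySem.Str.splitMax? s2 "@" 1).getD []) 0 ""
          let lower := PySem.Str.lower iface
          if PySem.Str.startswith lower "cali" then
            (g.1 ++ [iface], g.2.1, g.2.2.1, g.2.2.2)
          else if PySem.Str.startswith lower "cilium_host" || PySem.Str.startswith lower "cilium_net"
                || PySem.Str.startswith lower "cilium_vxlan" then
            (g.1, g.2.1 ++ [iface], g.2.2.1, g.2.2.2)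
          else if lower == "vxlan.calico" then
            (g.1, g.2.1, g.2.2.1 ++ [iface], g.2.2.2)
          else if lower == "tunl0" then
            (g.1, g.2.1, g.2.2.1, g.2.2.2 ++ [iface])
          else g)
      (c, ci, v, t)
    = (let ns := ((lines.filter (fun line =>
          !(PySem.Str.strip line == "") && PySem.Str.isIn ": " (PySem.Str.strip line))).map
            (fun line => pvParseLine (PySem.Str.strip line)))
       (c ++ ns.filter pvP1, ci ++ ns.filter pvP2, v ++ ns.filter pvP3, t ++ ns.filter pvP4)) := by
  induction lines generalizing c ci v t with
  | nil => simp
  | cons l ls ih =>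
    have hguard : (PySem.Str.strip l == "" || !(PySem.Str.isIn ": " (PySem.Str.strip l)))
        = !(!(PySem.Str.strip l == "") && PySem.Str.isIn ": " (PySem.Str.strip l)) := by
      cases (PySem.Str.strip l == "") <;> cases (PySem.Str.isIn ": " (PySem.Str.strip l)) <;> rfl
    by_cases hok : (!(PySem.Str.strip l == "") && PySem.Str.isIn ": " (PySem.Str.strip l)) = true
    · simp only [List.foldl_cons, List.filter_cons, hok, if_true, List.map_cons, hguard,
        Bool.not_true, Bool.false_eq_true, if_false]
      set x := pvParseLine (PySem.Str.strip l) with hx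
      have hxdef : PySem.List.pyGetD
          ((PySem.Str.splitMax?
              (PySem.List.pyGetD
                ((PySem.Str.splitMax?
                    (PySem.List.pyGetD ((PySem.Str.splitMax? (PySem.Str.strip l) ": " 1).getD []) 1 "")
                    ":" 1).getD []) 0 "")
              "@" 1).getD []) 0 "" = x := by
        rw [hx]; rfl
      rw [hxdef]
      by_cases h1 : pvP1 x = true
      · obtain ⟨h2, h3, h4⟩ := pv_p1_excl h1
        have h1u := h1; unfold pvP1 at h1u
        rw [if_pos h1u, ih]
        simp [h1, h2, h3, h4]
      · have h1' : pvP1 x = false := Bool.eq_false_iff.mpr h1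
        have h1u := h1'; unfold pvP1 at h1u
        rw [if_neg (Bool.eq_false_iff.mp h1u)]
        by_cases h2 : pvP2 x = true
        · obtain ⟨h3, h4⟩ := pv_p2_excl h2
          have h2u := h2; unfold pvP2 at h2u
          rw [if_pos h2u, ih]
          simp [h1', h2, h3, h4]
        · have h2' : pvP2 x = false := Bool.eq_false_iff.mpr h2
          have h2u := h2'; unfold pvP2 at h2u
          rw [if_neg (Bool.eq_false_iff.mp h2u)]
          by_cases h3 : pvP3 x = true
          · have h4 := pv_p3_excl h3
            have h3u := h3; unfold pvP3 at h3u
            rw [if_pos h3u, ih]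
            simp [h1', h2', h3, h4]
          · have h3' : pvP3 x = false := Bool.eq_false_iff.mpr h3
            have h3u := h3'; unfold pvP3 at h3u
            rw [if_neg (Bool.eq_false_iff.mp h3u)]
            by_cases h4 : pvP4 x = true
            · have h4u := h4; unfold pvP4 at h4u
              rw [if_pos h4u, ih]
              simp [h1', h2', h3', h4]
            · have h4' : pvP4 x = false := Bool.eq_false_iff.mpr h4
              have h4u := h4'; unfold pvP4 at h4u
              rw [if_neg (Bool.eq_false_iff.mp h4u), ih]
              simp [h1', h2', h3', h4']
    · have hok' : (!(PySem.Str.strip l == "") && PySem.Str.isIn ": " (PySem.Str.strip l)) = false :=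
        Bool.eq_false_iff.mpr hok
      simp only [List.foldl_cons, List.filter_cons, hok', Bool.false_eq_true, if_false, hguard,
        Bool.not_false, if_true]
      exact ih c ci v t

-- ===== VERDICT (by name: the statement is the Claim_ definition above) =====
theorem local_interface_groups_py_spec : Claim_equal_local_interface_groups_py := by
  intro network_text _
  unfold Spec_local_interface_groups_py local_interface_groups_py local_interface_groups_py_alt
    pvLocalNames pvSortedSet
  rw [pv_fold_inv, PySem.List.foldl_append_if]
  simp only [show pvP1 = (fun n => PySem.Str.startswith (PySem.Str.lower n) "cali") from rfl,
    show pvP2 = (fun n => PySem.Str.startswith (PySem.Str.lower n) "cilium_host"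
      || PySem.Str.startswith (PySem.Str.lower n) "cilium_net"
      || PySem.Str.startswith (PySem.Str.lower n) "cilium_vxlan") from rfl,
    show pvP3 = (fun n => PySem.Str.lower n == "vxlan.calico") from rfl,
    show pvP4 = (fun n => PySem.Str.lower n == "tunl0") from rfl]
  simp
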